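-- pv_equiv track=rewrite | github.com/achrysan/Time-Complexity | Serena Algorithm/HW6_StudentSolution.py | HW6_StudentSolution
-- ===== SOURCE A (Python) =====
-- from operator import itemgetter
--
-- def HW6_StudentSolution(rallies):
--     final = []
--     finaler = []
--     myDict = {}
--     count = 0
--     for x in rallies:
--         final.append((count,x[1]))
--         myDict[x[1]] = x[0]
--         count = count + 1
--     final = sorted(final,key=itemgetter(1))
--     accum = 0
--     count = 0
--     for y in final:
--             finalTuple = (y[0],accum)
--             accum = accum + myDict[y[1]]
--             finaler.insert(count, finalTuple)
--             if accum > y[1]: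
--                 return []
--             count = count + 1
--     return finaler
-- ===== SOURCE B (Python) =====
-- def HW6_StudentSolution(rallies):
--     myDict = {}
--     pending = []
--     for i, (v, k) in enumerate(rallies):
--         myDict[k] = v
--         pending.append((i, k))
--     out = []
--     accum = 0
--     while pending:
--         entry = min(pending, key=lambda e: e[1])
--         pending.remove(entry)
--         out.append((entry[0], accum))
--         accum += myDict[entry[1]]
--         if accum > entry[1]:
--             return []
--     return out
-- ===== Notes on version B (the rewrite author's own statement) =====
-- stated objective: alternative
-- what changed: A builds an index/key table, sorts it with the library sort and walks the sorted list with a fused accumulate-and-check loop; B never sorts: it keeps a pending list and repeatedly extracts the first minimum-key entry (stable selection via min + remove), accumulating and checking as each entry is extracted.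
import Mathlib
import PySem

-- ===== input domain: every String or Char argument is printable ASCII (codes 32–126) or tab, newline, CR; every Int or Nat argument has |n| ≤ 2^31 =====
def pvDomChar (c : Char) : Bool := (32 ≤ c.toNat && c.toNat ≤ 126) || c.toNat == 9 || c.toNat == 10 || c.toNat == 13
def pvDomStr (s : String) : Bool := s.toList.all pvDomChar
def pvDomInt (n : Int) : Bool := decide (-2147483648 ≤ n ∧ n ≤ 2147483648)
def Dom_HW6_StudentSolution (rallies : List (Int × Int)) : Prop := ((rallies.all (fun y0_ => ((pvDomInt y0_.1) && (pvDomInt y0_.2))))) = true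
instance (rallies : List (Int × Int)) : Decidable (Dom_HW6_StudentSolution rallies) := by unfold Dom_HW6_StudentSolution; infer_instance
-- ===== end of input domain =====

-- B replaces A's library-sort-then-scan by stable selection: it repeatedly extracts the first
-- minimum-key entry from a pending list while accumulating and checking; objective: alternative, not speed.


-- ===== PORT A =====
-- the second 'for y in final' loop of A (early 'return []' ⇒ structural recursion);
-- myDict[y[1]] cannot raise (every key of final was inserted into myDict), so getD is exact here
def aLoop (d : PySem.Dict Int Int) (l : List (Int × Int)) (accum count : Int)
    (finaler : List (Int × Int)) : List (Int × Int) :=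
  match l with
  | [] => finaler
  | y :: t =>
    let finalTuple := (y.1, accum)
    let accum' := accum + d.getD y.2 0
    let finaler' := PySem.List.insert finaler count finalTuple
    if accum' > y.2 then [] else aLoop d t accum' (count + 1) finaler'

def HW6_StudentSolution (rallies : List (Int × Int)) : List (Int × Int) :=
  let st := rallies.foldl
    (fun (s : List (Int × Int) × PySem.Dict Int Int × Int) x =>
      (s.1 ++ [(s.2.2, x.2)], s.2.1.insert x.2 x.1, s.2.2 + 1))
    ([], PySem.Dict.empty, 0)
  let final := PySem.List.sorted st.1 (fun y => y.2) false
  aLoop st.2.1 final 0 0 []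

-- ===== PORT B =====
-- termination facts for the while loop (pending.remove(entry) shortens pending)
theorem pvRemove_getD (xs : List (Int × Int)) (m : Int × Int) (h : m ∈ xs) :
    (PySem.List.remove? xs m).getD [] = xs.erase m := by
  rw [List.erase_eq_eraseIdx]
  cases hi : List.idxOf? m xs with
  | none => exact absurd (List.idxOf?_eq_none_iff.mp hi) (not_not_intro h)
  | some i => simp [PySem.List.remove?, hi]

theorem pvRemove_len (xs : List (Int × Int)) (m : Int × Int) (h : m ∈ xs) :
    ((PySem.List.remove? xs m).getD []).length < xs.length := by
  rw [pvRemove_getD xs m h, List.length_erase_of_mem h]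
  have : 0 < xs.length := List.length_pos_of_mem h
  omega

-- the 'while pending:' loop of B: min(pending, key=…) is PySem.List.min? (first extremal),
-- pending.remove(entry) is PySem.List.remove? (cannot raise: entry ∈ pending),
-- myDict[entry[1]] cannot raise (every key of pending was inserted), so getD is exact here
def bLoop (d : PySem.Dict Int Int) (pending : List (Int × Int)) (accum : Int)
    (out : List (Int × Int)) : List (Int × Int) :=
  match hm : PySem.List.min? pending (fun e => e.2) with
  | none => out
  | some entry =>
    let pending' := (PySem.List.remove? pending entry).getD []
    let out' := out ++ [(entry.1, accum)]
    let accum' := accum + d.getD entry.2 0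
    if accum' > entry.2 then [] else bLoop d pending' accum' out'
termination_by pending.length
decreasing_by exact pvRemove_len pending entry (PySem.List.min?_mem hm)

def HW6_StudentSolution_alt (rallies : List (Int × Int)) : List (Int × Int) :=
  let st := (PySem.List.enumerate rallies 0).foldl
    (fun (s : PySem.Dict Int Int × List (Int × Int)) ix =>
      (s.1.insert ix.2.2 ix.2.1, s.2 ++ [(ix.1, ix.2.2)]))
    (PySem.Dict.empty, [])
  bLoop st.1 st.2 0 []

-- ===== PRECONDITION & SPEC =====
def Spec_HW6_StudentSolution (rallies : List (Int × Int)) (out : List (Int × Int)) : Prop := out = HW6_StudentSolution_alt rallies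
instance (rallies : List (Int × Int)) (out : List (Int × Int)) : Decidable (Spec_HW6_StudentSolution rallies out) := by unfold Spec_HW6_StudentSolution; infer_instance

-- ===== CLAIM (what is proved, stated in full; the proofs are below) =====
def Claim_equal_HW6_StudentSolution : Prop := ∀ (rallies : List (Int × Int)), Dom_HW6_StudentSolution rallies → Spec_HW6_StudentSolution rallies (HW6_StudentSolution rallies)

-- ===== LEMMAS AND PROOFS =====

-- scalar tie-breaking key: on pairs with distinct first components in [0, n), ordering by
-- pvKeyL n is the stable order by second component
def pvKeyL (n : Int) (e : Int × Int) : Int := e.2 * n + e.1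

theorem pvKeyL_lt (n : Int) (x y : Int × Int) (hx : 0 ≤ x.1 ∧ x.1 < n) (hy : 0 ≤ y.1 ∧ y.1 < n)
    (h : x.2 < y.2 ∨ (x.2 = y.2 ∧ x.1 < y.1)) : pvKeyL n x < pvKeyL n y := by
  unfold pvKeyL
  rcases h with h | ⟨h1, h2⟩
  · have hn : (x.2 + 1) * n ≤ y.2 * n := mul_le_mul_of_nonneg_right (by omega) (by omega)
    nlinarith [hx.1, hx.2, hy.1, hy.2]
  · rw [h1]; omega

theorem pvKeyL_inj (n : Int) (x y : Int × Int) (hx : 0 ≤ x.1 ∧ x.1 < n) (hy : 0 ≤ y.1 ∧ y.1 < n)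
    (h : pvKeyL n x = pvKeyL n y) : x = y := by
  rcases lt_trichotomy x.2 y.2 with h2 | h2 | h2
  · exact absurd h (ne_of_lt (pvKeyL_lt n x y hx hy (Or.inl h2)))
  · have : x.1 = y.1 := by
      have := h; unfold pvKeyL at this; rw [h2] at this; omega
    exact Prod.ext this h2
  · exact absurd h (ne_of_gt (pvKeyL_lt n y x hy hx (Or.inl h2)))

theorem pvBefore_agree (n : Int) (x y : Int × Int) (hx : 0 ≤ x.1 ∧ x.1 < n)
    (hy : 0 ≤ y.1 ∧ y.1 < n) (hlt : y.1 < x.1) :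
    (decide (x.2 < y.2)) = (decide (pvKeyL n x < pvKeyL n y)) := by
  rw [decide_eq_decide]
  constructor
  · intro h; exact pvKeyL_lt n x y hx hy (Or.inl h)
  · intro h
    rcases lt_trichotomy x.2 y.2 with h2 | h2 | h2
    · exact h2
    · exact absurd h (lt_asymm (pvKeyL_lt n y x hy hx (Or.inr ⟨h2.symm, hlt⟩)))
    · exact absurd h (lt_asymm (pvKeyL_lt n y x hy hx (Or.inl h2)))

theorem pvInsertBy_congr {α : Type} (b1 b2 : α → α → Bool) (x : α) :
    ∀ ys : List α, (∀ y ∈ ys, b1 x y = b2 x y) →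
      PySem.List.insertBy b1 x ys = PySem.List.insertBy b2 x ys := by
  intro ys
  induction ys with
  | nil => intro _; rfl
  | cons y t ih =>
    intro h
    simp only [PySem.List.insertBy]
    rw [h y (by simp)]
    by_cases hb : b2 x y = true
    · simp [hb]
    · simp only [hb]
      rw [ih (fun z hz => h z (by simp [hz]))]

theorem pvFoldIns_congr (n : Int) :
    ∀ (xs acc : List (Int × Int)),
      (∀ x ∈ xs, 0 ≤ x.1 ∧ x.1 < n) →
      (∀ y ∈ acc, 0 ≤ y.1 ∧ y.1 < n) →
      (∀ y ∈ acc, ∀ x ∈ xs, y.1 < x.1) →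
      List.Pairwise (fun a b => a.1 < b.1) xs →
      xs.foldl (fun acc x => PySem.List.insertBy (fun a b => decide (a.2 < b.2)) x acc) acc
        = xs.foldl (fun acc x => PySem.List.insertBy (fun a b => decide (pvKeyL n a < pvKeyL n b)) x acc) acc := by
  intro xs
  induction xs with
  | nil => intros; rfl
  | cons x t ih =>
    intro acc hxb hab hlt hp
    simp only [List.foldl_cons]
    have hstep : PySem.List.insertBy (fun a b => decide (a.2 < b.2)) x acc
        = PySem.List.insertBy (fun a b => decide (pvKeyL n a < pvKeyL n b)) x acc :=
      pvInsertBy_congr _ _ x acc (fun y hy =>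
        pvBefore_agree n x y (hxb x (by simp)) (hab y hy) (hlt y hy x (by simp)))
    rw [hstep]
    apply ih
    · exact fun z hz => hxb z (by simp [hz])
    · intro y hy
      rcases (PySem.List.mem_insertBy _ x y acc).mp hy with rfl | hy'
      · exact hxb y (by simp)
      · exact hab y hy'
    · intro y hy z hz
      rcases (PySem.List.mem_insertBy _ x y acc).mp hy with rfl | hy'
      · exact (List.pairwise_cons.mp hp).1 z hz
      · exact hlt y hy' z (by simp [hz])
    · exact (List.pairwise_cons.mp hp).2

theorem pvSorted_keyL (n : Int) (xs : List (Int × Int))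
    (hb : ∀ x ∈ xs, 0 ≤ x.1 ∧ x.1 < n)
    (hp : List.Pairwise (fun a b => a.1 < b.1) xs) :
    PySem.List.sorted xs (fun e => e.2) false = PySem.List.sorted xs (pvKeyL n) false := by
  rw [PySem.List.sorted_eq_foldl_insertBy, PySem.List.sorted_eq_foldl_insertBy]
  exact pvFoldIns_congr n xs [] hb (by simp) (by simp) hp

-- Python's min(…, key=…) keeps the FIRST extremal element: everything strictly before it is strictly larger
theorem pvMinFoldFirst {α κ : Type} [LinearOrder κ] (key : α → κ) :
    ∀ (t : List α) (m0 m : α),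
      t.foldl (fun acc x => match acc with
        | none => some x
        | some c => if key x < key c then some x else some c) (some m0) = some m →
      m = m0 ∨ ∃ l1 l2, t = l1 ++ m :: l2 ∧ key m < key m0 ∧ ∀ y ∈ l1, key m < key y := by
  intro t
  induction t with
  | nil => intro m0 m h; left; simpa using h.symm
  | cons x t ih =>
    intro m0 m h
    simp only [List.foldl_cons] at h
    by_cases hx : key x < key m0
    · rw [if_pos hx] at h
      rcases ih x m h with h1 | ⟨l1, l2, ht, hlt, hall⟩
      · subst h1
        exact Or.inr ⟨[], t, rfl, hx, by simp⟩
      · refine Or.inr ⟨x :: l1, l2, by rw [ht, List.cons_append], lt_trans hlt hx, ?_⟩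
        intro y hy
        rcases List.mem_cons.mp hy with rfl | hy
        · exact hlt
        · exact hall y hy
    · rw [if_neg hx] at h
      rcases ih m0 m h with h1 | ⟨l1, l2, ht, hlt, hall⟩
      · exact Or.inl h1
      · refine Or.inr ⟨x :: l1, l2, by rw [ht, List.cons_append], hlt, ?_⟩
        intro y hy
        rcases List.mem_cons.mp hy with rfl | hy
        · exact lt_of_lt_of_le hlt (le_of_not_gt hx)
        · exact hall y hy

theorem pvMinFirst {α κ : Type} [LinearOrder κ] (key : α → κ) (xs : List α) (m : α)
    (h : PySem.List.min? xs key = some m) :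
    ∃ l1 l2, xs = l1 ++ m :: l2 ∧ ∀ y ∈ l1, key m < key y := by
  cases xs with
  | nil => simp [PySem.List.min?] at h
  | cons x t =>
    have h' : t.foldl (fun acc x => match acc with
        | none => some x
        | some c => if key x < key c then some x else some c) (some x) = some m := by
      simpa [PySem.List.min?] using h
    rcases pvMinFoldFirst key t x m h' with h1 | ⟨l1, l2, ht, hlt, hall⟩
    · subst h1; exact ⟨[], t, rfl, by simp⟩
    · refine ⟨x :: l1, l2, by rw [ht, List.cons_append], ?_⟩
      intro y hy
      rcases List.mem_cons.mp hy with rfl | hy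
      · exact hlt
      · exact hall y hy

-- the crux: a stable sort by key is the first minimum followed by the stable sort of the rest
theorem pvSortedMinCons (n : Int) (xs : List (Int × Int)) (m : Int × Int)
    (hb : ∀ x ∈ xs, 0 ≤ x.1 ∧ x.1 < n)
    (hp : List.Pairwise (fun a b => a.1 < b.1) xs)
    (hm : PySem.List.min? xs (fun e => e.2) = some m) :
    PySem.List.sorted xs (fun e => e.2) false
      = m :: PySem.List.sorted (xs.erase m) (fun e => e.2) false := by
  have hmem : m ∈ xs := PySem.List.min?_mem hm
  have hbe : ∀ x ∈ xs.erase m, 0 ≤ x.1 ∧ x.1 < n := fun x hx => hb x (List.mem_of_mem_erase hx)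
  have hpe : List.Pairwise (fun a b => a.1 < b.1) (xs.erase m) :=
    List.Pairwise.sublist List.erase_sublist hp
  have hnd : xs.Nodup := hp.imp (fun {a b} h => by intro he; rw [he] at h; exact lt_irrefl _ h)
  rw [pvSorted_keyL n xs hb hp, pvSorted_keyL n _ hbe hpe]
  apply PySem.List.sorted_eq_of_perm_of_pairwise_lt
  · exact ((PySem.List.sorted_perm _ _ _).cons m).trans (List.perm_cons_erase hmem).symm
  · rw [List.pairwise_cons]
    constructor
    · intro y hy
      have hyerase : y ∈ xs.erase m := (PySem.List.mem_sorted _ _ _ y).mp hy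
      have hyne : y ≠ m ∧ y ∈ xs := (hnd.mem_erase_iff).mp hyerase
      have hle : m.2 ≤ y.2 := PySem.List.min?_isMin hm y hyne.2
      rcases lt_or_eq_of_le hle with h2 | h2
      · exact pvKeyL_lt n m y (hb m hmem) (hb y hyne.2) (Or.inl h2)
      · obtain ⟨l1, l2, hsplit, hfirst⟩ := pvMinFirst _ xs m hm
        have hyl2 : y ∈ l2 := by
          have hyx := hyne.2
          rw [hsplit] at hyx
          rcases List.mem_append.mp hyx with h3 | h3
          · exact absurd h2.symm (ne_of_gt (hfirst y h3))
          · rcases List.mem_cons.mp h3 with rfl | h4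
            · exact absurd rfl hyne.1
            · exact h4
        have hfst : m.1 < y.1 := by
          rw [hsplit] at hp
          exact (List.pairwise_cons.mp (List.pairwise_append.mp hp).2.1).1 y hyl2
        exact pvKeyL_lt n m y (hb m hmem) (hb y hyne.2) (Or.inr ⟨h2, hfst⟩)
    · have hple := PySem.List.sorted_pairwise (xs.erase m) (pvKeyL n)
      have hnd2 : (PySem.List.sorted (xs.erase m) (pvKeyL n) false).Nodup :=
        ((PySem.List.sorted_perm _ _ _).nodup_iff).mpr (hnd.erase m)
      refine List.Pairwise.imp_of_mem ?_ (hple.and hnd2)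
      intro a b ha hb' h
      have haX : a ∈ xs := List.mem_of_mem_erase ((PySem.List.mem_sorted _ _ _ a).mp ha)
      have hbX : b ∈ xs := List.mem_of_mem_erase ((PySem.List.mem_sorted _ _ _ b).mp hb')
      rcases lt_or_eq_of_le h.1 with h3 | h3
      · exact h3
      · exact absurd (pvKeyL_inj n a b (hb a haX) (hb b hbX) h3) h.2

-- A's first loop builds (enumerate of the keys, the value-keyed dict, the length)
theorem pvFirstLoop (rallies : List (Int × Int)) (fin : List (Int × Int))
    (d : PySem.Dict Int Int) (c : Int) :
    rallies.foldl
      (fun (s : List (Int × Int) × PySem.Dict Int Int × Int) x =>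
        (s.1 ++ [(s.2.2, x.2)], s.2.1.insert x.2 x.1, s.2.2 + 1))
      (fin, d, c)
      = (fin ++ PySem.List.enumerate (rallies.map (·.2)) c,
         rallies.foldl (fun (d : PySem.Dict Int Int) p => d.insert p.2 p.1) d,
         c + rallies.length) := by
  induction rallies generalizing fin d c with
  | nil => simp [PySem.List.enumerate_nil]
  | cons x t ih => simp [PySem.List.enumerate_cons, ih]; ring

-- B's first loop builds (the same dict, the same enumerate of the keys)
theorem pvFirstLoopB (rallies : List (Int × Int)) (s : Int)
    (d : PySem.Dict Int Int) (p : List (Int × Int)) :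
    (PySem.List.enumerate rallies s).foldl
      (fun (st : PySem.Dict Int Int × List (Int × Int)) ix =>
        (st.1.insert ix.2.2 ix.2.1, st.2 ++ [(ix.1, ix.2.2)]))
      (d, p)
      = (rallies.foldl (fun (d : PySem.Dict Int Int) x => d.insert x.2 x.1) d,
         p ++ PySem.List.enumerate (rallies.map (·.2)) s) := by
  induction rallies generalizing s d p with
  | nil => simp [PySem.List.enumerate_nil]
  | cons x t ih => simp [PySem.List.enumerate_cons, ih]

-- A's loop over the sorted list equals B's selection loop
theorem pvLoopEq (d : PySem.Dict Int Int) (n : Int) :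
    ∀ (k : Nat) (xs : List (Int × Int)), xs.length = k →
      ∀ (accum : Int) (out : List (Int × Int)),
      (∀ x ∈ xs, 0 ≤ x.1 ∧ x.1 < n) →
      List.Pairwise (fun a b => a.1 < b.1) xs →
      aLoop d (PySem.List.sorted xs (fun e => e.2) false) accum (out.length : Int) out
        = bLoop d xs accum out := by
  intro k
  induction k with
  | zero =>
    intro xs hlen accum out _ _
    have hxs : xs = [] := List.length_eq_zero_iff.mp hlen
    subst hxs
    rw [bLoop]
    rfl
  | succ k ih =>
    intro xs hlen accum out hb hp
    have hne : xs ≠ [] := by intro h; subst h; simp at hlen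
    obtain ⟨m, hm⟩ : ∃ m, PySem.List.min? xs (fun e => e.2) = some m := by
      cases h : PySem.List.min? xs (fun e => e.2) with
      | none => exact absurd ((PySem.List.min?_eq_none_iff _ _).mp h) hne
      | some m => exact ⟨m, rfl⟩
    have hmem := PySem.List.min?_mem hm
    rw [pvSortedMinCons n xs m hb hp hm, bLoop, hm]
    simp only [aLoop]
    have hins : PySem.List.insert out (out.length : Int) (m.1, accum) = out ++ [(m.1, accum)] := by
      simpa [PySem.List.len] using PySem.List.insert_len out (m.1, accum)
    by_cases hc : accum + d.getD m.2 0 > m.2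
    · simp [hc]
    · simp only [hc, if_false, hins, pvRemove_getD xs m hmem]
      have hlen' : (xs.erase m).length = k := by
        rw [List.length_erase_of_mem hmem, hlen]; omega
      have hrec := ih (xs.erase m) hlen' (accum + d.getD m.2 0) (out ++ [(m.1, accum)])
        (fun x hx => hb x (List.mem_of_mem_erase hx))
        (List.Pairwise.sublist List.erase_sublist hp)
      have hcast : ((out ++ [(m.1, accum)]).length : Int) = (out.length : Int) + 1 := by
        simp
      rw [hcast] at hrec
      exact hrec

-- ===== VERDICT (by name: the statement is the Claim_ definition above) =====
theorem HW6_StudentSolution_spec : Claim_equal_HW6_StudentSolution := by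
  intro rallies _
  unfold Spec_HW6_StudentSolution HW6_StudentSolution HW6_StudentSolution_alt
  rw [pvFirstLoop, pvFirstLoopB]
  simp only [List.nil_append]
  have hb : ∀ x ∈ PySem.List.enumerate (rallies.map (·.2)) 0,
      0 ≤ x.1 ∧ x.1 < (rallies.length : Int) := by
    intro x hx
    obtain ⟨j, hj, hx⟩ := (PySem.List.mem_enumerate_iff _ _ _).mp hx
    subst hx
    simp only [List.length_map] at hj
    refine ⟨by omega, ?_⟩
    simp
    omega
  have h := pvLoopEq (rallies.foldl (fun (d : PySem.Dict Int Int) x => d.insert x.2 x.1) PySem.Dict.empty)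
    (rallies.length : Int)
    (PySem.List.enumerate (rallies.map (·.2)) 0).length
    (PySem.List.enumerate (rallies.map (·.2)) 0) rfl 0 [] hb
    (PySem.List.pairwise_lt_enumerate _ _)
  simpa using h
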